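-- pv_equiv track=rewrite | github.com/duydev02/translator-app | translator_app/ui/app.py | _doctab_title
-- ===== SOURCE A (Python) =====
-- def _doctab_title(text, idx):
--     if not text.strip():
--         return f"Tab {idx + 1}"
--     # Prefer the Javadoc description (first non-tag line inside /** ... */).
--     for raw in text.splitlines():
--         stripped = raw.strip()
--         if stripped.startswith("/**") or stripped.startswith("/*"):
--             stripped = stripped.lstrip("/*").strip()
--         elif stripped.startswith("*"):
--             stripped = stripped.lstrip("*").strip()
--         else:
--             continue
--         if not stripped or stripped.startswith(("@", "/")):
--             continue
--         return (stripped[:20] + "…") if len(stripped) > 20 else stripped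
--     # Otherwise fall back to the first non-blank, non-comment line of code.
--     for raw in text.splitlines():
--         line = raw.strip()
--         if not line:
--             continue
--         if line.startswith(("/*", "*/", "*", "//", "#", "--")):
--             continue
--         return (line[:20] + "…") if len(line) > 20 else line
--     return f"Tab {idx + 1}"
-- ===== SOURCE B (Python) =====
-- def _doctab_title(text, idx):
--     if not text.strip():
--         return f"Tab {idx + 1}"
--     # Single pass: return the first valid Javadoc description line immediately,
--     # while remembering the first code line as a fallback for after the loop.
--     code_fallback = None
--     for raw in text.splitlines():
--         stripped = raw.strip()
--         if stripped.startswith("/*"):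
--             body = stripped.lstrip("/*").strip()
--         elif stripped.startswith("*"):
--             body = stripped.lstrip("*").strip()
--         else:
--             body = None
--         if body and not body.startswith(("@", "/")):
--             return (body[:20] + "…") if len(body) > 20 else body
--         if code_fallback is None and stripped and not stripped.startswith(("/*", "*/", "*", "//", "#", "--")):
--             code_fallback = (stripped[:20] + "…") if len(stripped) > 20 else stripped
--     return code_fallback if code_fallback is not None else f"Tab {idx + 1}"
-- ===== Notes on version B (the rewrite author's own statement) =====
-- stated objective: alternative
-- what changed: Replaces A's two separate scans over splitlines (javadoc pass, then code pass) with one fused pass that returns a valid javadoc line immediately and accumulates the first code line in a fallback variable.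
import Mathlib
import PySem

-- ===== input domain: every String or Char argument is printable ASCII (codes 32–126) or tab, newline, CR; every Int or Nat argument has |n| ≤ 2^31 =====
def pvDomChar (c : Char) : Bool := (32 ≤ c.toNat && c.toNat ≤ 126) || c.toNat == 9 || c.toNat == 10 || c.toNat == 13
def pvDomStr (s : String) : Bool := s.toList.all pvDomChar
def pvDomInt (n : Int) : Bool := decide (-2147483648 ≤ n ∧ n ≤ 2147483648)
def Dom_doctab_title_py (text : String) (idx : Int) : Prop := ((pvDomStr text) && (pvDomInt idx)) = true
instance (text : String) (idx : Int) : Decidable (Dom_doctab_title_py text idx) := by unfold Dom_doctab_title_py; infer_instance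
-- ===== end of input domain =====

-- B does one fused pass over the lines (early return for a javadoc title, fallback
-- accumulator for the first code line) instead of A's two scans; same results.

-- shared helpers: both Pythons use the identical truncation expression, the identical
-- f-string default, and the identical code-comment prefix tuple.
def pvTrunc (s : List Char) : List Char :=
  if 20 < PySem.Chars.len s then PySem.Chars.slice s none (some (20 : Int)) ++ ['…'] else s

def pvDefault (idx : Int) : String := String.ofList ("Tab ".toList ++ (PySem.Int.toStr (idx + 1)).toList)

def pvCodePrefix (line : List Char) : Bool :=
  PySem.Chars.startswith line ['/', '*'] || PySem.Chars.startswith line ['*', '/'] ||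
  PySem.Chars.startswith line ['*'] || PySem.Chars.startswith line ['/', '/'] ||
  PySem.Chars.startswith line ['#'] || PySem.Chars.startswith line ['-', '-']

-- ===== PORT A =====
-- first loop of A: the javadoc scan.  stripped.lstrip("/*") / lstrip("*") are ported
-- by hand as dropWhile over the character set — exact for Python's lstrip(chars).
def pvLoopJ : List (List Char) → Option (List Char)
  | [] => none
  | raw :: rest =>
    let stripped := PySem.Chars.strip raw
    if PySem.Chars.startswith stripped ['/', '*', '*'] || PySem.Chars.startswith stripped ['/', '*'] then
      let s := PySem.Chars.strip (stripped.dropWhile (fun c => c == '/' || c == '*'))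
      if s.isEmpty || PySem.Chars.startswith s ['@'] || PySem.Chars.startswith s ['/'] then
        pvLoopJ rest
      else some (pvTrunc s)
    else if PySem.Chars.startswith stripped ['*'] then
      let s := PySem.Chars.strip (stripped.dropWhile (fun c => c == '*'))
      if s.isEmpty || PySem.Chars.startswith s ['@'] || PySem.Chars.startswith s ['/'] then
        pvLoopJ rest
      else some (pvTrunc s)
    else pvLoopJ rest

-- second loop of A: the code-line scan.
def pvLoopC : List (List Char) → Option (List Char)
  | [] => none
  | raw :: rest =>
    let line := PySem.Chars.strip raw
    if line.isEmpty then pvLoopC rest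
    else if pvCodePrefix line then pvLoopC rest
    else some (pvTrunc line)

def doctab_title_py (text : String) (idx : Int) : String :=
  if (PySem.Chars.strip text.toList).isEmpty then pvDefault idx
  else
    match pvLoopJ (PySem.Chars.splitlines text.toList) with
    | some s => String.ofList s
    | none =>
      match pvLoopC (PySem.Chars.splitlines text.toList) with
      | some s => String.ofList s
      | none => pvDefault idx

-- ===== PORT B =====
-- B's javadoc classifier for one stripped line (lstrip(chars) as dropWhile, exact).
def pvJTitle (stripped : List Char) : Option (List Char) :=
  let body? :=
    if PySem.Chars.startswith stripped ['/', '*'] then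
      some (PySem.Chars.strip (stripped.dropWhile (fun c => c == '/' || c == '*')))
    else if PySem.Chars.startswith stripped ['*'] then
      some (PySem.Chars.strip (stripped.dropWhile (fun c => c == '*')))
    else none
  match body? with
  | some body =>
    if !body.isEmpty && !PySem.Chars.startswith body ['@'] && !PySem.Chars.startswith body ['/'] then
      some body
    else none
  | none => none

-- B's single loop with the code fallback accumulator.
def pvLoopB : List (List Char) → Option (List Char) → Option (List Char)
  | [], fb => fb
  | raw :: rest, fb =>
    let stripped := PySem.Chars.strip raw
    match pvJTitle stripped with
    | some body => some (pvTrunc body)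
    | none =>
      let fb' := if fb.isNone && !stripped.isEmpty && !pvCodePrefix stripped
                 then some (pvTrunc stripped) else fb
      pvLoopB rest fb'

def doctab_title_py_alt (text : String) (idx : Int) : String :=
  if (PySem.Chars.strip text.toList).isEmpty then pvDefault idx
  else
    match pvLoopB (PySem.Chars.splitlines text.toList) none with
    | some s => String.ofList s
    | none => pvDefault idx

-- ===== PRECONDITION & SPEC =====
def Spec_doctab_title_py (text : String) (idx : Int) (out : String) : Prop := out = doctab_title_py_alt text idx
instance (text : String) (idx : Int) (out : String) : Decidable (Spec_doctab_title_py text idx out) := by unfold Spec_doctab_title_py; infer_instance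

-- ===== CLAIM (what is proved, stated in full; the proofs are below) =====
def Claim_equal_doctab_title_py : Prop := ∀ (text : String) (idx : Int), Dom_doctab_title_py text idx → Spec_doctab_title_py text idx (doctab_title_py text idx)

-- ===== LEMMAS AND PROOFS =====

-- a line starting with "/**" also starts with "/*"
lemma sw_javadoc (s : List Char) (h : PySem.Chars.startswith s ['/', '*'] = false) :
    PySem.Chars.startswith s ['/', '*', '*'] = false := by
  by_contra hne
  have h3 : PySem.Chars.startswith s ['/', '*', '*'] = true := by
    cases hx : PySem.Chars.startswith s ['/', '*', '*'] <;> simp_all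
  exact absurd ((PySem.Chars.startswith_iff s ['/', '*']).mpr
    (List.IsPrefix.trans (by decide) ((PySem.Chars.startswith_iff s ['/', '*', '*']).mp h3))) (by simp [h])

-- loop invariant: B's fused pass computes A's javadoc scan, else the fallback, else A's code scan.
lemma loopB_eq (lines : List (List Char)) (fb : Option (List Char)) :
    pvLoopB lines fb = (pvLoopJ lines).or (fb.or (pvLoopC lines)) := by
  induction lines generalizing fb with
  | nil => cases fb <;> simp [pvLoopB, pvLoopJ, pvLoopC]
  | cons raw rest ih =>
    simp only [pvLoopB, pvLoopJ, pvLoopC, pvJTitle]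
    by_cases h1 : PySem.Chars.startswith (PySem.Chars.strip raw) ['/', '*'] = true
    · have hpfx : pvCodePrefix (PySem.Chars.strip raw) = true := by simp [pvCodePrefix, h1]
      by_cases he : PySem.Chars.strip ((PySem.Chars.strip raw).dropWhile (fun c => c == '/' || c == '*')) = []
      · simp [h1, hpfx, he, ih]
      · by_cases ha : PySem.Chars.startswith (PySem.Chars.strip ((PySem.Chars.strip raw).dropWhile (fun c => c == '/' || c == '*'))) ['@'] = true
        · simp [h1, hpfx, he, ha, ih]
        · by_cases hd : PySem.Chars.startswith (PySem.Chars.strip ((PySem.Chars.strip raw).dropWhile (fun c => c == '/' || c == '*'))) ['/'] = true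
          · simp [h1, hpfx, he, ha, hd, ih]
          · simp [h1, he, ha, hd]
    · have h0 := sw_javadoc _ (by simpa using h1)
      by_cases h2 : PySem.Chars.startswith (PySem.Chars.strip raw) ['*'] = true
      · have hpfx : pvCodePrefix (PySem.Chars.strip raw) = true := by simp [pvCodePrefix, h2]
        by_cases he : PySem.Chars.strip ((PySem.Chars.strip raw).dropWhile (fun c => c == '*')) = []
        · simp [h0, h1, h2, hpfx, he, ih]
        · by_cases ha : PySem.Chars.startswith (PySem.Chars.strip ((PySem.Chars.strip raw).dropWhile (fun c => c == '*'))) ['@'] = true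
          · simp [h0, h1, h2, hpfx, he, ha, ih]
          · by_cases hd : PySem.Chars.startswith (PySem.Chars.strip ((PySem.Chars.strip raw).dropWhile (fun c => c == '*'))) ['/'] = true
            · simp [h0, h1, h2, hpfx, he, ha, hd, ih]
            · simp [h0, h1, h2, he, ha, hd]
      · by_cases hb : PySem.Chars.strip raw = []
        · have e1 : PySem.Chars.startswith ([] : List Char) ['/', '*', '*'] = false := by decide
          have e2 : PySem.Chars.startswith ([] : List Char) ['/', '*'] = false := by decide
          have e3 : PySem.Chars.startswith ([] : List Char) ['*'] = false := by decide
          have e4 : PySem.Chars.strip ([] : List Char) = [] := by decide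
          simp [hb, e1, e2, e3, e4, ih]
        · by_cases hp : pvCodePrefix (PySem.Chars.strip raw) = true
          · simp [h0, h1, h2, hb, hp, ih]
          · cases fb with
            | none => simp [h0, h1, h2, hb, hp, ih]
            | some f => simp [h0, h1, h2, hb, hp, ih]

-- ===== VERDICT (by name: the statement is the Claim_ definition above) =====
theorem doctab_title_py_spec : Claim_equal_doctab_title_py := by
  intro text idx _
  unfold Spec_doctab_title_py doctab_title_py doctab_title_py_alt
  by_cases h : (PySem.Chars.strip text.toList).isEmpty = true
  · simp [h]
  · simp only [h, if_false, loopB_eq]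
    cases hj : pvLoopJ (PySem.Chars.splitlines text.toList) with
    | some s => simp
    | none =>
      cases hc : pvLoopC (PySem.Chars.splitlines text.toList) with
      | some s => simp
      | none => simp
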